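-- pv_equiv track=rewrite | github.com/inclusionAI/AReaL | ablate_data/masking/inference_heir_new.py | _create_masked_attention
-- ===== SOURCE A (Python) =====
-- from typing import List, Dict, Optional, Tuple
--
-- def _create_masked_attention(
--
--     base_mask: List[int],
--     mask_ranges: List[Tuple[int, int]]
-- ) -> List[int]:
--     """
--     Create attention mask by masking specific token ranges.
--
--     Args:
--         base_mask: Base attention mask (usually all 1s)
--         mask_ranges: List of (start, end) tuples to mask
--
--     Returns:
--         Modified attention mask with masked positions set to 0
--     """
--     attention_mask = base_mask.copy()
--     for start, end in mask_ranges: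
--         for i in range(start, end):
--             if 0 <= i < len(attention_mask):
--                 attention_mask[i] = 0
--     return attention_mask
-- ===== SOURCE B (Python) =====
-- from typing import List, Tuple
--
-- def _create_masked_attention(
--     base_mask: List[int],
--     mask_ranges: List[Tuple[int, int]]
-- ) -> List[int]:
--     # Difference-array rewrite: mark clamped range boundaries in a dict,
--     # then a single prefix sweep decides which positions are covered.
--     n = len(base_mask)
--     diff = {}
--     for start, end in mask_ranges:
--         s = start if start > 0 else 0
--         e = end if end < n else n
--         if s < e:
--             diff[s] = diff.get(s, 0) + 1
--             diff[e] = diff.get(e, 0) - 1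
--     out = []
--     cover = 0
--     for i in range(n):
--         cover += diff.get(i, 0)
--         out.append(0 if cover > 0 else base_mask[i])
--     return out
-- ===== Notes on version B (the rewrite author's own statement) =====
-- stated objective: alternative
-- what changed: A walks every index of every range and zeroes a copy in place; B records clamped range boundaries in a difference dict and decides coverage in one prefix sweep over the mask, never touching individual range indices.
import Mathlib
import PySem

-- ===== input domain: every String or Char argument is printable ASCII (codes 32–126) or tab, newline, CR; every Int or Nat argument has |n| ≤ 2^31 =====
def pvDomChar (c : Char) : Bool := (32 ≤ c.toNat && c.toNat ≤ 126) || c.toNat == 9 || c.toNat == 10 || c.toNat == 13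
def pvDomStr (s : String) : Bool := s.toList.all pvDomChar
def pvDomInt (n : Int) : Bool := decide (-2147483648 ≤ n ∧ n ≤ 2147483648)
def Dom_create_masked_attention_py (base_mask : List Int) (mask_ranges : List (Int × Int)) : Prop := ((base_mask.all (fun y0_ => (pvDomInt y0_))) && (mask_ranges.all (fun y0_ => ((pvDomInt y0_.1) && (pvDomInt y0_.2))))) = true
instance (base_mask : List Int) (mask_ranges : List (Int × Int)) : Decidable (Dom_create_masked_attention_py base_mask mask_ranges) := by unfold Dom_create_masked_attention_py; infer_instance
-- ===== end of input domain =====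

-- B replaces A's mutate-a-copy, walk-every-range-index loops by a difference dict of
-- clamped range boundaries plus one prefix sweep over the mask (objective: alternative).
-- ===== PORT A =====
-- inner loop body of A: 'if 0 <= i < len(attention_mask): attention_mask[i] = 0'
def pvA_inner (am : List Int) (i : Int) : List Int :=
  if 0 ≤ i ∧ i < (am.length : Int) then am.set i.toNat 0 else am

def create_masked_attention_py (base_mask : List Int) (mask_ranges : List (Int × Int)) : List Int :=
  mask_ranges.foldl (fun attention_mask se =>
    (PySem.List.pyRange se.1 se.2 1).foldl pvA_inner attention_mask) base_mask

-- ===== PORT B =====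
-- loop body of B's first loop: clamp the range and mark its boundaries in the diff dict
def pvB_mark (n : Int) (d : PySem.Dict Int Int) (se : Int × Int) : PySem.Dict Int Int :=
  let s := if se.1 > 0 then se.1 else 0
  let e := if se.2 < n then se.2 else n
  if s < e then
    let d1 := d.insert s (d.getD s 0 + 1)
    d1.insert e (d1.getD e 0 - 1)
  else d

def create_masked_attention_py_alt (base_mask : List Int) (mask_ranges : List (Int × Int)) : List Int :=
  let n : Int := base_mask.length
  let diff := mask_ranges.foldl (pvB_mark n) PySem.Dict.empty
  ((PySem.List.pyRange 0 n 1).foldl (fun (st : List Int × Int) i =>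
      let cover := st.2 + diff.getD i 0
      (st.1 ++ [if cover > 0 then 0 else PySem.List.pyGetD base_mask i 0], cover)) ([], 0)).1

-- ===== PRECONDITION & SPEC =====
def Spec_create_masked_attention_py (base_mask : List Int) (mask_ranges : List (Int × Int)) (out : List Int) : Prop := out = create_masked_attention_py_alt base_mask mask_ranges
instance (base_mask : List Int) (mask_ranges : List (Int × Int)) (out : List Int) : Decidable (Spec_create_masked_attention_py base_mask mask_ranges out) := by unfold Spec_create_masked_attention_py; infer_instance

-- ===== CLAIM (what is proved, stated in full; the proofs are below) =====
def Claim_equal_create_masked_attention_py : Prop := ∀ (base_mask : List Int) (mask_ranges : List (Int × Int)), Dom_create_masked_attention_py base_mask mask_ranges → Spec_create_masked_attention_py base_mask mask_ranges (create_masked_attention_py base_mask mask_ranges)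

-- ===== LEMMAS AND PROOFS =====

-- identity mapIdx
theorem pv_mapIdx_if_false (l : List Int) (c : Nat → Prop) [DecidablePred c]
    (h : ∀ j, ¬ c j) : l.mapIdx (fun j x => if c j then 0 else x) = l := by
  apply List.ext_getElem
  · simp
  · intro j h1 h2
    simp [List.getElem_mapIdx, h j]

theorem pv_range_fold (t : Nat) : ∀ (a e : Int) (am : List Int), (e - a).toNat = t →
    (PySem.List.pyRange a e 1).foldl pvA_inner am
      = am.mapIdx (fun j x => if a ≤ (j : Int) ∧ (j : Int) < e then 0 else x) := by
  induction t with
  | zero =>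
    intro a e am ht
    have he : e ≤ a := by omega
    rw [PySem.List.pyRange_one_eq_nil he]
    rw [pv_mapIdx_if_false]
    · rfl
    · intro j; omega
  | succ t ih =>
    intro a e am ht
    have hlt : a < e := by omega
    rw [PySem.List.pyRange_one_cons hlt, List.foldl_cons,
        ih (a+1) e (pvA_inner am a) (by omega)]
    by_cases hb : 0 ≤ a ∧ a < (am.length : Int)
    · have hset : pvA_inner am a = am.set a.toNat 0 := by
        unfold pvA_inner; rw [if_pos hb]
      rw [hset]
      apply List.ext_getElem
      · simp
      · intro j hj1 hj2
        have hjlen : j < am.length := by simpa using hj2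
        have hjset : j < (am.set a.toNat 0).length := by simpa using hjlen
        simp only [List.getElem_mapIdx, List.getElem_set]
        by_cases hja : a.toNat = j
        · have h1 : a ≤ (j : Int) ∧ (j : Int) < e := by omega
          rw [if_pos h1, if_pos hja]
          split_ifs <;> rfl
        · have hja' : (j : Int) ≠ a := by omega
          rw [if_neg hja]
          have heq : ((a + 1 ≤ (j:Int) ∧ (j:Int) < e)) ↔ ((a ≤ (j:Int) ∧ (j:Int) < e)) := by omega
          simp only [heq]
    · have hset : pvA_inner am a = am := by
        unfold pvA_inner; rw [if_neg hb]
      rw [hset]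
      apply List.ext_getElem
      · simp
      · intro j hj1 hj2
        have hjlen : j < am.length := by simpa using hj2
        simp only [List.getElem_mapIdx]
        have heq : ((a + 1 ≤ (j:Int) ∧ (j:Int) < e)) ↔ ((a ≤ (j:Int) ∧ (j:Int) < e)) := by omega
        simp only [heq]

theorem pv_main (mask_ranges : List (Int × Int)) : ∀ (am : List Int),
    mask_ranges.foldl (fun attention_mask se =>
        (PySem.List.pyRange se.1 se.2 1).foldl pvA_inner attention_mask) am
      = am.mapIdx (fun j x =>
          if mask_ranges.any (fun se => decide (se.1 ≤ (j : Int) ∧ (j : Int) < se.2)) then 0 else x) := by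
  induction mask_ranges with
  | nil =>
    intro am
    simp only [List.foldl_nil, List.any_nil]
    apply Eq.symm
    apply List.ext_getElem
    · simp
    · intro j h1 h2
      simp [List.getElem_mapIdx]
  | cons se rs ih =>
    intro am
    rw [List.foldl_cons, ih,
        pv_range_fold (se.2 - se.1).toNat se.1 se.2 am rfl]
    apply List.ext_getElem
    · simp
    · intro j hj1 hj2
      simp only [List.getElem_mapIdx, List.any_cons]
      by_cases h1 : se.1 ≤ (j : Int) ∧ (j : Int) < se.2
      · simp [h1]
      · simp only [decide_eq_false h1, if_neg h1, Bool.false_or]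

-- ===== B-side lemmas =====
-- prefix sum of the diff dict over positions 0..m-1
def pvS (d : PySem.Dict Int Int) (m : Nat) : Int :=
  ((List.range m).map (fun p => d.getD (p : Int) 0)).sum

theorem pvS_succ (d : PySem.Dict Int Int) (m : Nat) :
    pvS d (m + 1) = pvS d m + d.getD (m : Int) 0 := by
  simp [pvS, List.range_succ]

theorem pvS_insert (d : PySem.Dict Int Int) (k v : Int) (m : Nat) :
    pvS (d.insert k v) m = pvS d m + (if 0 ≤ k ∧ k < (m : Int) then v - d.getD k 0 else 0) := by
  induction m with
  | zero =>
    have : ¬ (0 ≤ k ∧ k < ((0 : Nat) : Int)) := by omega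
    simp [pvS, this]
  | succ m ih =>
    rw [pvS_succ, pvS_succ, ih, PySem.Dict.getD_insert]
    by_cases hk : ((m : Int)) = k
    · subst hk
      have h1 : ¬ ((0:Int) ≤ (m:Int) ∧ (m:Int) < (m:Int)) := by omega
      have h2 : (0:Int) ≤ (m:Int) ∧ (m:Int) < ((m:Nat) + 1 : Nat) := by push_cast; omega
      rw [if_pos rfl, if_neg h1, if_pos (by exact_mod_cast h2)]
      ring
    · rw [if_neg hk]
      have : ((0 ≤ k ∧ k < ((m+1 : Nat) : Int))) ↔ ((0 ≤ k ∧ k < (m : Int))) := by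
        push_cast; omega
      rw [if_congr this rfl rfl]
      ring

theorem pvS_mark (n : Int) (d : PySem.Dict Int Int) (se : Int × Int) (i : Nat)
    (hi : (i : Int) < n) :
    pvS (pvB_mark n d se) (i + 1)
      = pvS d (i + 1) + (if se.1 ≤ (i : Int) ∧ (i : Int) < se.2 then 1 else 0) := by
  unfold pvB_mark
  by_cases hse : (if se.1 > 0 then se.1 else 0) < (if se.2 < n then se.2 else n)
  · rw [if_pos hse]
    rw [pvS_insert, pvS_insert, PySem.Dict.getD_insert]
    split_ifs with h1 h2 h3 h4 h5 h6 h7 <;> push_cast <;> omega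
  · rw [if_neg hse]
    have : ¬ (se.1 ≤ (i : Int) ∧ (i : Int) < se.2) := by
      split_ifs at hse <;> omega
    rw [if_neg this]
    ring

theorem pvS_fold (n : Int) (rs : List (Int × Int)) (i : Nat) (hi : (i : Int) < n) :
    ∀ d : PySem.Dict Int Int,
    pvS (rs.foldl (pvB_mark n) d) (i + 1)
      = pvS d (i + 1) + ((rs.countP (fun se => decide (se.1 ≤ (i : Int) ∧ (i : Int) < se.2)) : Nat) : Int) := by
  induction rs with
  | nil => intro d; simp
  | cons se rs ih =>
    intro d
    rw [List.foldl_cons, ih, pvS_mark n d se i hi, List.countP_cons]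
    by_cases h : se.1 ≤ (i : Int) ∧ (i : Int) < se.2
    · rw [if_pos h]
      simp only [decide_eq_true h, if_true]
      push_cast; ring
    · rw [if_neg h]
      simp only [decide_eq_false h, Bool.false_eq_true, if_false]
      push_cast; ring

theorem pvS_empty (m : Nat) : pvS (PySem.Dict.empty : PySem.Dict Int Int) m = 0 := by
  induction m with
  | zero => simp [pvS]
  | succ m ih =>
    rw [pvS_succ, ih, PySem.Dict.getD_empty]
    ring

-- the prefix sweep unrolled: after m steps the output lists the first m decisions and cover = pvS diff m
theorem pvB_sweep (base_mask : List Int) (diff : PySem.Dict Int Int) (m : Nat) :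
    (PySem.List.pyRange 0 (m : Int) 1).foldl (fun (st : List Int × Int) i =>
        let cover := st.2 + diff.getD i 0
        (st.1 ++ [if cover > 0 then 0 else PySem.List.pyGetD base_mask i 0], cover)) ([], 0)
      = ((List.range m).map (fun j =>
            if pvS diff (j + 1) > 0 then 0 else PySem.List.pyGetD base_mask (j : Int) 0),
         pvS diff m) := by
  induction m with
  | zero => simp [PySem.List.pyRange_zero_nat, pvS]
  | succ m ih =>
    have hm : ((m : Int)) + 1 = ((m + 1 : Nat) : Int) := by push_cast; ring
    rw [← hm, PySem.List.pyRange_one_succ_right (by positivity), List.foldl_append, ih]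
    simp only [List.foldl_cons, List.foldl_nil, List.range_succ, List.map_append,
      List.map_cons, List.map_nil]
    apply Prod.ext
    · simp only [List.append_cancel_left_eq]
      rw [← pvS_succ]
    · simp only
      rw [← pvS_succ]

-- ===== VERDICT =====
theorem create_masked_attention_py_spec : Claim_equal_create_masked_attention_py := by
  intro base_mask mask_ranges _
  unfold Spec_create_masked_attention_py create_masked_attention_py create_masked_attention_py_alt
  rw [pv_main mask_ranges base_mask]
  simp only []
  rw [pvB_sweep base_mask (mask_ranges.foldl (pvB_mark (base_mask.length : Int)) PySem.Dict.empty) base_mask.length]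
  apply List.ext_getElem
  · simp
  · intro j hj1 hj2
    have hjlen : j < base_mask.length := by simpa using hj1
    simp only [List.getElem_mapIdx, List.getElem_map, List.getElem_range]
    rw [pvS_fold (base_mask.length : Int) mask_ranges j (by exact_mod_cast hjlen), pvS_empty]
    rw [PySem.List.pyGetD_natCast, List.getD_eq_getElem?_getD, List.getElem?_eq_getElem hjlen]
    by_cases h : mask_ranges.any (fun se => decide (se.1 ≤ (j : Int) ∧ (j : Int) < se.2)) = true
    · rw [if_pos h]
      have : 0 < mask_ranges.countP (fun se => decide (se.1 ≤ (j : Int) ∧ (j : Int) < se.2)) := by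
        rw [List.countP_pos_iff]
        simpa [List.any_eq_true] using h
      rw [if_pos (by push_cast; omega)]
    · rw [if_neg h]
      have hc0 : mask_ranges.countP (fun se => decide (se.1 ≤ (j : Int) ∧ (j : Int) < se.2)) = 0 := by
        rw [List.countP_eq_zero]
        intro se hse
        by_contra hc
        exact h (List.any_eq_true.mpr ⟨se, hse, by simpa using hc⟩)
      rw [hc0]
      simp
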